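-- pv_equiv track=rewrite | github.com/osipm01/inf-ege-2025 | 19/19-27786.py | f
-- ===== SOURCE A (Python) =====
-- def f(x, y, h):
--     if h == 3 and x + y >= 86:
--         return 1
--     elif h == 3 and x + y < 86:
--         return 0
--     elif h < 3 and x + y >= 86:
--         return 0
--     else:
--         if h % 2 == 0:
--             return f(x + 1, y, h + 1) or f(x, y + 1, h + 1) or f(x * 2, y, h + 1) or f(x, y * 2, h + 1)
--         else:
--             return f(x + 1, y, h + 1) or f(x, y + 1, h + 1) or f(x * 2, y, h + 1) or f(x, y * 2, h + 1)
-- ===== SOURCE B (Python) =====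
-- def f(x, y, h):
--     # Iterative depth-first search with an explicit stack and a single early
--     # return, instead of four-way 'or'-recursion.  Children are pushed in
--     # reverse so the first move is explored first.
--     stack = [(x, y, h)]
--     while stack:
--         a, b, g = stack.pop()
--         if g == 3:
--             if a + b >= 86:
--                 return 1
--         elif a + b < 86:
--             stack.extend([(a, 2 * b, g + 1), (2 * a, b, g + 1),
--                           (a, b + 1, g + 1), (a + 1, b, g + 1)])
--     return 0
-- ===== Notes on version B (the rewrite author's own statement) =====
-- stated objective: alternative
-- what changed: Replaces the four-way nested 'or'-recursion by an iterative depth-first search: an explicit stack of states with a single early return on the first winning level-3 state.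
import Mathlib
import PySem

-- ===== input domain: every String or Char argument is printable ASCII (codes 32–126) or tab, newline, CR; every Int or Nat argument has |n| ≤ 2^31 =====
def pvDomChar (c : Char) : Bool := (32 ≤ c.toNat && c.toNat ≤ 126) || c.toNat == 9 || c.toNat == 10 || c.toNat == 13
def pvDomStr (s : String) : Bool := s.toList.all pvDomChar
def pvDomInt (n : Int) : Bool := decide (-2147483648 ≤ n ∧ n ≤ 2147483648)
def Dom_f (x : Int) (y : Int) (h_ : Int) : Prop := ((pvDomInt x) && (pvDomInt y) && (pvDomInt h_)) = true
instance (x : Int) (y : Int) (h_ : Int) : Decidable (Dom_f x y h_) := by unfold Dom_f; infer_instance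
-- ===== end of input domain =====

-- B replaces the four-way 'or'-recursion by an iterative depth-first search over an explicit
-- stack with one early return; equivalence of the return values is proved for h_ ≤ 3.

-- ===== PORT A =====
-- Python 'a or b' on ints: a if truthy else b
def pyOr (a b : Int) : Int := if a ≠ 0 then a else b

-- fuel = number of levels left until 3; only reached with h_ ≤ 3 (Pre_f), where fuel never runs out
def fAux : Nat → Int → Int → Int → Int
  | fuel, x, y, h =>
    if h = 3 ∧ x + y ≥ 86 then 1
    else if h = 3 ∧ x + y < 86 then 0
    else if h < 3 ∧ x + y ≥ 86 then 0
    else match fuel with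
      | 0 => 0
      | n + 1 =>
        if PySem.Int.mod h 2 = 0 then
          pyOr (fAux n (x + 1) y (h + 1)) (pyOr (fAux n x (y + 1) (h + 1))
            (pyOr (fAux n (x * 2) y (h + 1)) (fAux n x (y * 2) (h + 1))))
        else
          pyOr (fAux n (x + 1) y (h + 1)) (pyOr (fAux n x (y + 1) (h + 1))
            (pyOr (fAux n (x * 2) y (h + 1)) (fAux n x (y * 2) (h + 1))))

def f (x : Int) (y : Int) (h_ : Int) : Int := fAux (3 - h_).toNat x y h_

-- ===== PORT B =====
-- the stack is kept top-first: Python's append-at-end/pop-at-end list is this List's head.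
-- Each entry additionally carries the remaining depth (3 - g).toNat as a Nat fuel so that the
-- loop is well-founded in Lean; it is maintained, never consulted by the algorithm's tests.
def tcnt : Nat → Nat
  | 0 => 1
  | n + 1 => 4 * tcnt n + 1

def stackMeasure (st : List (Int × Int × Int × Nat)) : Nat :=
  (st.map (fun e => tcnt e.2.2.2)).sum

theorem tcnt_pos (n : Nat) : 0 < tcnt n := by
  cases n <;> simp [tcnt]

def dfs : List (Int × Int × Int × Nat) → Int
  | [] => 0
  | (a, b, g, n) :: rest =>
    if g = 3 then
      (if a + b ≥ 86 then 1 else dfs rest)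
    else match n with
      | 0 => dfs rest          -- fuel exhausted: unreachable from f_alt's initial stack (proved below)
      | m + 1 =>
        if a + b < 86 then
          dfs ((a + 1, b, g + 1, m) :: (a, b + 1, g + 1, m) :: (2 * a, b, g + 1, m) :: (a, 2 * b, g + 1, m) :: rest)
        else dfs rest
termination_by st => stackMeasure st
decreasing_by
  all_goals simp only [stackMeasure, List.map_cons, List.sum_cons]
  all_goals
    first
      | (have h := tcnt_pos n; omega)
      | (simp only [tcnt]; omega)
      | (have h := tcnt_pos m; omega)
      | omega

def f_alt (x : Int) (y : Int) (h_ : Int) : Int := dfs [(x, y, h_, (3 - h_).toNat)]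

-- ===== PRECONDITION & SPEC =====
-- For h_ > 3 the Python A recurses forever (h never hits 3) and raises RecursionError; excluded.
def Pre_f (x : Int) (y : Int) (h_ : Int) : Prop := h_ ≤ 3
instance (x : Int) (y : Int) (h_ : Int) : Decidable (Pre_f x y h_) := by unfold Pre_f; infer_instance
def pvWitness_f : Int × Int × Int := (40, 40, 0)

def Spec_f (x : Int) (y : Int) (h_ : Int) (out : Int) : Prop := out = f_alt x y h_
instance (x : Int) (y : Int) (h_ : Int) (out : Int) : Decidable (Spec_f x y h_ out) := by unfold Spec_f; infer_instance

-- ===== CLAIM (what is proved, stated in full; the proofs are below) =====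
def Claim_equal_f : Prop := ∀ (x : Int) (y : Int) (h_ : Int), Dom_f x y h_ → Pre_f x y h_ → Spec_f x y h_ (f x y h_)

-- ===== LEMMAS AND PROOFS =====

-- A's result is always 0 or 1
theorem fAux_zero_or_one (n : Nat) (x y h : Int) : fAux n x y h = 0 ∨ fAux n x y h = 1 := by
  induction n generalizing x y h with
  | zero =>
    simp only [fAux]
    split_ifs <;> simp
  | succ n ih =>
    simp only [fAux]
    split_ifs <;> try simp
    all_goals
      rcases ih (x + 1) y (h + 1) with h1 | h1 <;>
      rcases ih x (y + 1) (h + 1) with h2 | h2 <;>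
      rcases ih (x * 2) y (h + 1) with h3 | h3 <;>
      rcases ih x (y * 2) (h + 1) with h4 | h4 <;>
      simp [pyOr, h1, h2, h3, h4]

-- the list of moves from a state (proof-side helper)
def moves (p : Int × Int) : List (Int × Int) :=
  [(p.1 + 1, p.2), (p.1, p.2 + 1), (2 * p.1, p.2), (p.1, 2 * p.2)]

-- one step of A below level 3 and below 86: the four-way OR
theorem fAux_step (n : Nat) (x y h : Int) (hne : h ≠ 3) (hs : ¬ x + y ≥ 86) :
    fAux (n + 1) x y h =
      pyOr (fAux n (x + 1) y (h + 1)) (pyOr (fAux n x (y + 1) (h + 1))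
        (pyOr (fAux n (x * 2) y (h + 1)) (fAux n x (y * 2) (h + 1)))) := by
  conv_lhs => simp only [fAux]
  rw [if_neg (by tauto), if_neg (by tauto), if_neg (by tauto)]
  exact ite_self _

theorem pyOr_eq_one (a b : Int) (ha : a = 0 ∨ a = 1) : pyOr a b = 1 ↔ a = 1 ∨ b = 1 := by
  rcases ha with rfl | rfl <;> simp [pyOr]

-- one level of A, for h < 3: succeeds iff still below 86 and some move succeeds
theorem fAux_succ_iff (n : Nat) (x y h : Int) (hlt : h < 3) :
    fAux (n + 1) x y h = 1 ↔ x + y < 86 ∧ ∃ q ∈ moves (x, y), fAux n q.1 q.2 (h + 1) = 1 := by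
  have hne : ¬(h = 3) := by omega
  by_cases hs : x + y ≥ 86
  · simp only [fAux]
    simp [hne, hlt, hs, show ¬(x + y < 86) by omega]
  · have hs' : x + y < 86 := by omega
    rw [fAux_step n x y h hne hs,
      pyOr_eq_one _ _ (fAux_zero_or_one n (x + 1) y (h + 1)),
      pyOr_eq_one _ _ (fAux_zero_or_one n x (y + 1) (h + 1)),
      pyOr_eq_one _ _ (fAux_zero_or_one n (x * 2) y (h + 1))]
    simp only [moves, List.exists_mem_cons_iff, List.not_mem_nil]
    simp [hs']
    rw [mul_comm (2 : Int) x, mul_comm (2 : Int) y]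

-- level-3 leaf of A
theorem fAux_leaf (x y : Int) : fAux 0 x y 3 = 1 ↔ x + y ≥ 86 := by
  simp only [fAux]
  by_cases hge : x + y ≥ 86
  · simp [hge]
  · simp [hge, show x + y < 86 by omega]

-- pruned node of A
theorem fAux_prune (m : Nat) (x y h : Int) (hlt : h < 3) (hs : x + y ≥ 86) :
    fAux m x y h = 0 := by
  cases m <;> · simp only [fAux]; simp [show ¬ h = 3 by omega, hlt, hs, show ¬ x + y < 86 by omega]

-- the stack invariant: B's DFS returns 1 exactly when some stacked state makes A succeed,
-- for stacks whose levels are ≤ 3 with matching depth fields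
theorem dfs_eq (k : Nat) (st : List (Int × Int × Int × Nat))
    (hwf : ∀ e ∈ st, e.2.2.1 ≤ 3 ∧ e.2.2.2 = (3 - e.2.2.1).toNat) (hk : stackMeasure st ≤ k) :
    dfs st =
      if st.any (fun e => fAux e.2.2.2 e.1 e.2.1 e.2.2.1 = 1) then 1 else 0 := by
  induction k generalizing st with
  | zero =>
    cases st with
    | nil => simp [dfs]
    | cons e rest =>
      exfalso
      have h1 := tcnt_pos e.2.2.2
      simp only [stackMeasure, List.map_cons, List.sum_cons, Nat.le_zero] at hk
      omega
  | succ k ih =>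
    cases st with
    | nil => simp [dfs]
    | cons e rest =>
      obtain ⟨a, b, g, n⟩ := e
      obtain ⟨hg, hn⟩ := hwf (a, b, g, n) (by simp)
      simp only [] at hg hn
      have hg' : g ≤ 3 := by simpa using hg
      have hn' : n = (3 - g).toNat := by simpa using hn
      clear hg hn
      have hwfr : ∀ e ∈ rest, e.2.2.1 ≤ 3 ∧ e.2.2.2 = (3 - e.2.2.1).toNat :=
        fun e he => hwf e (by simp [he])
      by_cases h3 : g = 3
      · subst h3
        have hn0 : n = 0 := by omega
        subst hn0
        have hm : stackMeasure rest ≤ k := by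
          simp only [stackMeasure, List.map_cons, List.sum_cons] at hk ⊢
          simp [tcnt] at hk; omega
        by_cases hge : a + b ≥ 86
        · simp only [dfs]
          rw [if_pos trivial, if_pos hge]
          have h01 : fAux 0 a b 3 = 1 := (fAux_leaf a b).2 hge
          simp [h01]
        · simp only [dfs]
          rw [if_pos trivial, if_neg hge]
          rw [ih rest hwfr hm]
          refine if_congr ?_ rfl rfl
          simp only [List.any_cons, Bool.or_eq_true, decide_eq_true_eq, fAux_leaf]
          tauto
      · have hlt : g < 3 := by omega
        obtain ⟨m, rfl⟩ : ∃ m, n = m + 1 := ⟨(2 - g).toNat, by omega⟩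
        have hm' : m = (3 - (g + 1)).toNat := by omega
        by_cases hs : a + b < 86
        · have hwfc : ∀ e ∈ ((a + 1, b, g + 1, m) :: (a, b + 1, g + 1, m) :: (2 * a, b, g + 1, m) ::
              (a, 2 * b, g + 1, m) :: rest), e.2.2.1 ≤ 3 ∧ e.2.2.2 = (3 - e.2.2.1).toNat := by
            intro e he
            simp only [List.mem_cons] at he
            rcases he with rfl | rfl | rfl | rfl | he <;>
              first | (refine ⟨by simp; omega, by simp; omega⟩) | exact hwfr e he
          have hmm : stackMeasure ((a + 1, b, g + 1, m) :: (a, b + 1, g + 1, m) :: (2 * a, b, g + 1, m) ::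
              (a, 2 * b, g + 1, m) :: rest) ≤ k := by
            simp only [stackMeasure, List.map_cons, List.sum_cons, tcnt] at hk ⊢
            omega
          simp only [dfs, if_neg h3, if_pos hs]
          rw [ih _ hwfc hmm]
          have hhead : fAux (m + 1) a b g = 1 ↔
              fAux m (a + 1) b (g + 1) = 1 ∨ fAux m a (b + 1) (g + 1) = 1 ∨
              fAux m (2 * a) b (g + 1) = 1 ∨ fAux m a (2 * b) (g + 1) = 1 := by
            rw [fAux_succ_iff m a b g hlt]
            simp only [moves, List.exists_mem_cons_iff, List.not_mem_nil]
            simp [hs]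
          refine if_congr ?_ rfl rfl
          simp only [List.any_cons, Bool.or_eq_true, decide_eq_true_eq]
          rw [hhead]
          tauto
        · have h0 : fAux (m + 1) a b g = 0 := fAux_prune _ a b g hlt (by omega)
          have hm : stackMeasure rest ≤ k := by
            simp only [stackMeasure, List.map_cons, List.sum_cons, tcnt] at hk ⊢
            omega
          simp only [dfs, if_neg h3, if_neg hs]
          rw [ih rest hwfr hm]
          refine if_congr (by simp [h0]) rfl rfl

-- ===== VERDICT (by name: the statement is the Claim_ definition above) =====
theorem f_spec : Claim_equal_f := by
  intro x y h_ _ hpre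
  have h3 : h_ ≤ 3 := hpre
  unfold Spec_f f f_alt
  rw [dfs_eq (stackMeasure [(x, y, h_, (3 - h_).toNat)]) [(x, y, h_, (3 - h_).toNat)]
    (by simp; omega) (le_refl _)]
  simp only [List.any_cons, List.any_nil, Bool.or_false, decide_eq_true_eq]
  rcases fAux_zero_or_one (3 - h_).toNat x y h_ with h0 | h1
  · simp [h0]
  · simp [h1]
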